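-- pv_equiv track=rewrite | github.com/scorchio/pybites | 85/ninja.py | _get_belt
-- ===== SOURCE A (Python) =====
-- scores = [10, 50, 100, 175, 250, 400, 600, 800, 1000]
--
-- ranks = 'white yellow orange green blue brown black paneled red'.split()
--
-- def _get_belt(new_score):
--     belt_index = -1
--     for i, score in enumerate(scores):
--         if new_score >= score:
--             belt_index = i
--     if belt_index == -1:
--         return None
--     return ranks[belt_index]
-- ===== SOURCE B (Python) =====
-- from bisect import bisect_right
--
-- scores = [10, 50, 100, 175, 250, 400, 600, 800, 1000]
--
-- ranks = 'white yellow orange green blue brown black paneled red'.split()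
--
-- def _get_belt(new_score):
--     idx = bisect_right(scores, new_score)
--     if idx == 0:
--         return None
--     return ranks[idx - 1]
-- ===== Notes on version B (the rewrite author's own statement) =====
-- stated objective: idiomatic
-- what changed: Replaces A's full linear scan keeping a last-satisfying index with a bisect_right binary search on the sorted scores list, returning ranks[idx-1] for the insertion point idx.
import Mathlib
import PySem

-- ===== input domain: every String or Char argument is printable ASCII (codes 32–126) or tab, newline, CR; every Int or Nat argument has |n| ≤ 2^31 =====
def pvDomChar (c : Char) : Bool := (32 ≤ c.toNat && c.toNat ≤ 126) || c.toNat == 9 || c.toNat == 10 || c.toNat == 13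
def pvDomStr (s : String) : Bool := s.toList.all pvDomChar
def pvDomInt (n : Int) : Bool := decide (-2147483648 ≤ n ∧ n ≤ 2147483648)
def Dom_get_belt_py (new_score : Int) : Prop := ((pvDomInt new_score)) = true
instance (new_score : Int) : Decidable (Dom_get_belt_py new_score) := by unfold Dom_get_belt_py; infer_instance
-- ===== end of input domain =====

-- B replaces A's linear scan with a bisect_right binary search on the sorted scores list (idiomatic).
-- ===== PORT A =====
def pvScores : List Int := [10, 50, 100, 175, 250, 400, 600, 800, 1000]
def pvRanks : List String := PySem.Str.split₀ "white yellow orange green blue brown black paneled red"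

def get_belt_py (new_score : Int) : Option String :=
  let belt_index : Int :=
    (PySem.List.enumerate pvScores).foldl
      (fun bi (p : Int × Int) => if new_score ≥ p.2 then p.1 else bi) (-1)
  if belt_index = -1 then none
  else PySem.List.pyGet? pvRanks belt_index

-- ===== PORT B =====
-- port of bisect.bisect_right(xs, x) as the standard lo/hi binary search
def pvBisectRight (xs : List Int) (x : Int) : Nat → Nat → Nat
  | lo, hi =>
    if h : lo < hi then
      let mid := (lo + hi) / 2
      if x < xs.getD mid 0 then pvBisectRight xs x lo mid
      else pvBisectRight xs x (mid + 1) hi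
    else lo
  termination_by lo hi => hi - lo
  decreasing_by all_goals omega

def get_belt_py_alt (new_score : Int) : Option String :=
  let idx := pvBisectRight pvScores new_score 0 pvScores.length
  if idx = 0 then none
  else PySem.List.pyGet? pvRanks ((idx : Int) - 1)

-- ===== PRECONDITION & SPEC =====
def Spec_get_belt_py (new_score : Int) (out : Option String) : Prop := out = get_belt_py_alt new_score
instance (new_score : Int) (out : Option String) : Decidable (Spec_get_belt_py new_score out) := by unfold Spec_get_belt_py; infer_instance

-- ===== CLAIM (what is proved, stated in full; the proofs are below) =====
def Claim_equal_get_belt_py : Prop := ∀ (new_score : Int), Dom_get_belt_py new_score → Spec_get_belt_py new_score (get_belt_py new_score)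

-- ===== LEMMAS AND PROOFS =====

-- ===== VERDICT (by name: the statement is the Claim_ definition above) =====
theorem pvBis_eval (n : Int) :
  pvBisectRight pvScores n 0 9 =
    (if n < 10 then 0 else if n < 50 then 1 else if n < 100 then 2 else if n < 175 then 3
     else if n < 250 then 4 else if n < 400 then 5 else if n < 600 then 6 else if n < 800 then 7
     else if n < 1000 then 8 else 9) := by
  split_ifs <;>
    (repeat first
      | rw [if_pos (by omega)]
      | rw [if_neg (by omega)]
      | (rw [pvBisectRight]; norm_num [pvScores]))

theorem get_belt_py_spec : Claim_equal_get_belt_py := by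
  intro n _
  unfold Spec_get_belt_py get_belt_py get_belt_py_alt
  simp only [pvScores, List.foldl, List.length,
    PySem.List.enumerate_cons, PySem.List.enumerate_nil]
  norm_num
  have hb := pvBis_eval n
  simp only [pvScores] at hb
  rw [hb]
  by_cases h1 : n < 10
  · simp only [show n < 10 from by omega, show ¬ n ≥ 10 from by omega, show n < 50 from by omega, show ¬ n ≥ 50 from by omega, show n < 100 from by omega, show ¬ n ≥ 100 from by omega, show n < 175 from by omega, show ¬ n ≥ 175 from by omega, show n < 250 from by omega, show ¬ n ≥ 250 from by omega, show n < 400 from by omega, show ¬ n ≥ 400 from by omega, show n < 600 from by omega, show ¬ n ≥ 600 from by omega, show n < 800 from by omega, show ¬ n ≥ 800 from by omega, show n < 1000 from by omega, show ¬ n ≥ 1000 from by omega, if_pos, if_neg, ite_true, ite_false]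
    all_goals decide
  by_cases h2 : n < 50
  · simp only [show ¬ n < 10 from by omega, show n ≥ 10 from by omega, show n < 50 from by omega, show ¬ n ≥ 50 from by omega, show n < 100 from by omega, show ¬ n ≥ 100 from by omega, show n < 175 from by omega, show ¬ n ≥ 175 from by omega, show n < 250 from by omega, show ¬ n ≥ 250 from by omega, show n < 400 from by omega, show ¬ n ≥ 400 from by omega, show n < 600 from by omega, show ¬ n ≥ 600 from by omega, show n < 800 from by omega, show ¬ n ≥ 800 from by omega, show n < 1000 from by omega, show ¬ n ≥ 1000 from by omega, if_pos, if_neg, ite_true, ite_false]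
    all_goals decide
  by_cases h3 : n < 100
  · simp only [show ¬ n < 10 from by omega, show n ≥ 10 from by omega, show ¬ n < 50 from by omega, show n ≥ 50 from by omega, show n < 100 from by omega, show ¬ n ≥ 100 from by omega, show n < 175 from by omega, show ¬ n ≥ 175 from by omega, show n < 250 from by omega, show ¬ n ≥ 250 from by omega, show n < 400 from by omega, show ¬ n ≥ 400 from by omega, show n < 600 from by omega, show ¬ n ≥ 600 from by omega, show n < 800 from by omega, show ¬ n ≥ 800 from by omega, show n < 1000 from by omega, show ¬ n ≥ 1000 from by omega, if_pos, if_neg, ite_true, ite_false]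
    all_goals decide
  by_cases h4 : n < 175
  · simp only [show ¬ n < 10 from by omega, show n ≥ 10 from by omega, show ¬ n < 50 from by omega, show n ≥ 50 from by omega, show ¬ n < 100 from by omega, show n ≥ 100 from by omega, show n < 175 from by omega, show ¬ n ≥ 175 from by omega, show n < 250 from by omega, show ¬ n ≥ 250 from by omega, show n < 400 from by omega, show ¬ n ≥ 400 from by omega, show n < 600 from by omega, show ¬ n ≥ 600 from by omega, show n < 800 from by omega, show ¬ n ≥ 800 from by omega, show n < 1000 from by omega, show ¬ n ≥ 1000 from by omega, if_pos, if_neg, ite_true, ite_false]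
    all_goals decide
  by_cases h5 : n < 250
  · simp only [show ¬ n < 10 from by omega, show n ≥ 10 from by omega, show ¬ n < 50 from by omega, show n ≥ 50 from by omega, show ¬ n < 100 from by omega, show n ≥ 100 from by omega, show ¬ n < 175 from by omega, show n ≥ 175 from by omega, show n < 250 from by omega, show ¬ n ≥ 250 from by omega, show n < 400 from by omega, show ¬ n ≥ 400 from by omega, show n < 600 from by omega, show ¬ n ≥ 600 from by omega, show n < 800 from by omega, show ¬ n ≥ 800 from by omega, show n < 1000 from by omega, show ¬ n ≥ 1000 from by omega, if_pos, if_neg, ite_true, ite_false]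
    all_goals decide
  by_cases h6 : n < 400
  · simp only [show ¬ n < 10 from by omega, show n ≥ 10 from by omega, show ¬ n < 50 from by omega, show n ≥ 50 from by omega, show ¬ n < 100 from by omega, show n ≥ 100 from by omega, show ¬ n < 175 from by omega, show n ≥ 175 from by omega, show ¬ n < 250 from by omega, show n ≥ 250 from by omega, show n < 400 from by omega, show ¬ n ≥ 400 from by omega, show n < 600 from by omega, show ¬ n ≥ 600 from by omega, show n < 800 from by omega, show ¬ n ≥ 800 from by omega, show n < 1000 from by omega, show ¬ n ≥ 1000 from by omega, if_pos, if_neg, ite_true, ite_false]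
    all_goals decide
  by_cases h7 : n < 600
  · simp only [show ¬ n < 10 from by omega, show n ≥ 10 from by omega, show ¬ n < 50 from by omega, show n ≥ 50 from by omega, show ¬ n < 100 from by omega, show n ≥ 100 from by omega, show ¬ n < 175 from by omega, show n ≥ 175 from by omega, show ¬ n < 250 from by omega, show n ≥ 250 from by omega, show ¬ n < 400 from by omega, show n ≥ 400 from by omega, show n < 600 from by omega, show ¬ n ≥ 600 from by omega, show n < 800 from by omega, show ¬ n ≥ 800 from by omega, show n < 1000 from by omega, show ¬ n ≥ 1000 from by omega, if_pos, if_neg, ite_true, ite_false]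
    all_goals decide
  by_cases h8 : n < 800
  · simp only [show ¬ n < 10 from by omega, show n ≥ 10 from by omega, show ¬ n < 50 from by omega, show n ≥ 50 from by omega, show ¬ n < 100 from by omega, show n ≥ 100 from by omega, show ¬ n < 175 from by omega, show n ≥ 175 from by omega, show ¬ n < 250 from by omega, show n ≥ 250 from by omega, show ¬ n < 400 from by omega, show n ≥ 400 from by omega, show ¬ n < 600 from by omega, show n ≥ 600 from by omega, show n < 800 from by omega, show ¬ n ≥ 800 from by omega, show n < 1000 from by omega, show ¬ n ≥ 1000 from by omega, if_pos, if_neg, ite_true, ite_false]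
    all_goals decide
  by_cases h9 : n < 1000
  · simp only [show ¬ n < 10 from by omega, show n ≥ 10 from by omega, show ¬ n < 50 from by omega, show n ≥ 50 from by omega, show ¬ n < 100 from by omega, show n ≥ 100 from by omega, show ¬ n < 175 from by omega, show n ≥ 175 from by omega, show ¬ n < 250 from by omega, show n ≥ 250 from by omega, show ¬ n < 400 from by omega, show n ≥ 400 from by omega, show ¬ n < 600 from by omega, show n ≥ 600 from by omega, show ¬ n < 800 from by omega, show n ≥ 800 from by omega, show n < 1000 from by omega, show ¬ n ≥ 1000 from by omega, if_pos, if_neg, ite_true, ite_false]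
    all_goals decide
  simp only [show ¬ n < 10 from by omega, show n ≥ 10 from by omega, show ¬ n < 50 from by omega, show n ≥ 50 from by omega, show ¬ n < 100 from by omega, show n ≥ 100 from by omega, show ¬ n < 175 from by omega, show n ≥ 175 from by omega, show ¬ n < 250 from by omega, show n ≥ 250 from by omega, show ¬ n < 400 from by omega, show n ≥ 400 from by omega, show ¬ n < 600 from by omega, show n ≥ 600 from by omega, show ¬ n < 800 from by omega, show n ≥ 800 from by omega, show ¬ n < 1000 from by omega, show n ≥ 1000 from by omega, if_pos, if_neg, ite_true, ite_false]
  all_goals decide
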